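-- pv_equiv track=rewrite | github.com/cobeio/entityd | entityd/__main__.py | _parse_disabled_plugins
-- ===== SOURCE A (Python) =====
-- def _parse_disabled_plugins(arguments):
--     """Parse list of plugins to disable from command line arguments.
--
--     This parses a list of command line arguments looking for --disable
--     switches. Any arguments that follow are treated as plugin to disable,
--     until a new switch is encountered.
--
--     Alternatively, the --disable= prefixed form may be used which only
--     allows for a single plugin to be specified.
--
--     If the disable argument refers to an entire module -- e.g. it doesn't
--     contain a colon -- then it implicitly ignores everything from that
--     module as well. As in, `fileme` is treated as `fileme:*`.
--
--     :param arguments: The raw command line arguments to parse.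
--     :type arguments: list of str
--
--     :returns: An iterator of plugins to disable.
--     """
--     accumulate = False
--     for argument in (argument.strip() for argument in arguments):
--         disabled = None
--         if argument.startswith('-'):
--             accumulate = False
--             if argument == '--disable':
--                 accumulate = True
--             elif argument.startswith('--disable='):
--                 disabled = argument[len('--disable='):]
--         elif accumulate:
--             disabled = argument
--         if disabled is not None:
--             if ':' not in disabled:
--                 yield disabled + ':*'
--             yield disabled
-- ===== SOURCE B (Python) =====
-- def _parse_disabled_plugins(arguments):
--     """Run-based rewrite: strip once, scan with an index consuming the whole
--     run of non-switch arguments after each bare '--disable' in an inner loop,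
--     then expand colon-less names in a final pass."""
--     args = [argument.strip() for argument in arguments]
--     names = []
--     i = 0
--     n = len(args)
--     while i < n:
--         a = args[i]
--         i += 1
--         if a == '--disable':
--             while i < n and not args[i].startswith('-'):
--                 names.append(args[i])
--                 i += 1
--         elif a.startswith('--disable='):
--             names.append(a[len('--disable='):])
--     for name in names:
--         if ':' not in name:
--             yield name + ':*'
--         yield name
-- ===== Notes on version B (the rewrite author's own statement) =====
-- stated objective: alternative
-- what changed: Replaces A's boolean accumulate-flag state machine interleaved with yielding by a run-based scan: strip all arguments once, then an index loop that consumes the whole run of non-switch arguments after each bare --disable in an inner loop (and --disable= inline), collecting raw names, followed by a separate expansion pass that emits name:* before each colon-less name.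
import Mathlib
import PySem

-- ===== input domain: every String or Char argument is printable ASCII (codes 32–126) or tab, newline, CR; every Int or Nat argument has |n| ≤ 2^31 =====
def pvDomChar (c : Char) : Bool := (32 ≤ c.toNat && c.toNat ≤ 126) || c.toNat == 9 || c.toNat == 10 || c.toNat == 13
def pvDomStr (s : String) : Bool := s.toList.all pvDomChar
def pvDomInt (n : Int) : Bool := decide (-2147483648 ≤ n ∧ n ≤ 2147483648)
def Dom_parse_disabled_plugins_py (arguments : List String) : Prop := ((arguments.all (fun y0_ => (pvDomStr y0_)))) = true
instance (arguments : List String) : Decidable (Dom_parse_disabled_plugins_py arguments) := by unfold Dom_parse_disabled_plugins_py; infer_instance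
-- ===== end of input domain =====

-- B replaces A's accumulate-flag generator loop by a run-consuming nested scan over pre-stripped arguments plus a separate expansion pass; return-value equivalence proved on Dom.


-- ===== PORT A =====
-- A's loop body: state = (accumulate, yielded-so-far); yields happen inline.
def pvStepA (st : Bool × List String) (arg : String) : Bool × List String :=
  let argument := PySem.Str.strip arg
  if PySem.Str.startswith argument "-" then
    if argument == "--disable" then (true, st.2)
    else if PySem.Str.startswith argument "--disable=" then
      let disabled := PySem.Str.slice argument (some 10) none
      (false, st.2 ++ (if !(PySem.Str.isIn ":" disabled) then [disabled ++ ":*"] else []) ++ [disabled])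
    else (false, st.2)
  else if st.1 then
    let disabled := argument
    (st.1, st.2 ++ (if !(PySem.Str.isIn ":" disabled) then [disabled ++ ":*"] else []) ++ [disabled])
  else st

def parse_disabled_plugins_py (arguments : List String) : List String :=
  (arguments.foldl pvStepA (false, [])).2

-- ===== PORT B =====
-- B's inner while condition: the argument does not start with '-'
def pvRun (s : String) : Bool := !(PySem.Str.startswith s "-")

-- B's outer index loop over the pre-stripped arguments: after a bare
-- '--disable' the inner while consumes the run of non-switch arguments
-- (takeWhile = the names appended, dropWhile = where the index resumes).
def pvCollect : List String → List String
  | [] => []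
  | a :: rest =>
    if a == "--disable" then
      rest.takeWhile pvRun ++ pvCollect (rest.dropWhile pvRun)
    else if PySem.Str.startswith a "--disable=" then
      PySem.Str.slice a (some 10) none :: pvCollect rest
    else pvCollect rest
termination_by l => l.length
decreasing_by
  · exact Nat.lt_succ_of_le (List.length_dropWhile_le pvRun rest)
  · simp
  · simp

-- B's final expansion pass over one collected name
def pvExpand (name : String) : List String :=
  if !(PySem.Str.isIn ":" name) then [name ++ ":*", name] else [name]

def parse_disabled_plugins_py_alt (arguments : List String) : List String :=
  (pvCollect (arguments.map PySem.Str.strip)).flatMap pvExpand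

-- ===== PRECONDITION & SPEC =====
def Spec_parse_disabled_plugins_py (arguments : List String) (out : List String) : Prop := out = parse_disabled_plugins_py_alt arguments
instance (arguments : List String) (out : List String) : Decidable (Spec_parse_disabled_plugins_py arguments out) := by unfold Spec_parse_disabled_plugins_py; infer_instance

-- ===== CLAIM (what is proved, stated in full; the proofs are below) =====
def Claim_equal_parse_disabled_plugins_py : Prop := ∀ (arguments : List String), Dom_parse_disabled_plugins_py arguments → Spec_parse_disabled_plugins_py arguments (parse_disabled_plugins_py arguments)

-- ===== LEMMAS AND PROOFS =====

-- A's state machine as a recursion over the already-stripped arguments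
def pvRawS (acc : Bool) : List String → List String
  | [] => []
  | s :: rest =>
    if PySem.Str.startswith s "-" then
      if s == "--disable" then pvRawS true rest
      else if PySem.Str.startswith s "--disable=" then
        PySem.Str.slice s (some 10) none :: pvRawS false rest
      else pvRawS false rest
    else if acc then s :: pvRawS acc rest else pvRawS acc rest

lemma pv_expand_flat (d : String) (l : List String) :
    (d :: l).flatMap pvExpand
      = ((if !(PySem.Str.isIn ":" d) then [d ++ ":*"] else []) ++ [d]) ++ l.flatMap pvExpand := by
  simp only [List.flatMap_cons, pvExpand]
  split_ifs <;> simp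

lemma pv_fold_eq_rawS : ∀ (args : List String) (acc : Bool) (out : List String),
    (List.foldl pvStepA (acc, out) args).2
      = out ++ (pvRawS acc (args.map PySem.Str.strip)).flatMap pvExpand
  | [], acc, out => by simp [pvRawS]
  | a :: args, acc, out => by
    rw [List.foldl_cons]
    simp only [List.map_cons]
    by_cases h1 : PySem.Str.startswith (PySem.Str.strip a) "-" = true
    · by_cases h2 : (PySem.Str.strip a == "--disable") = true
      · have hstep : pvStepA (acc, out) a = (true, out) := by
          simp only [pvStepA, h1, h2, if_true]
        rw [hstep, pv_fold_eq_rawS args true out]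
        simp only [pvRawS, h1, h2, if_true]
      · by_cases h3 : PySem.Str.startswith (PySem.Str.strip a) "--disable=" = true
        · have hstep : pvStepA (acc, out) a
              = (false, out
                  ++ (if !(PySem.Str.isIn ":" (PySem.Str.slice (PySem.Str.strip a) (some 10) none))
                      then [PySem.Str.slice (PySem.Str.strip a) (some 10) none ++ ":*"] else [])
                  ++ [PySem.Str.slice (PySem.Str.strip a) (some 10) none]) := by
            simp only [pvStepA, h1, h2, h3, if_true, if_false, Bool.false_eq_true]
          rw [hstep, pv_fold_eq_rawS args false]
          simp only [pvRawS, h1, h2, h3, if_true, if_false, Bool.false_eq_true, pv_expand_flat]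
          simp only [List.append_assoc]
        · have hstep : pvStepA (acc, out) a = (false, out) := by
            simp only [pvStepA, h1, h2, h3, if_true, if_false, Bool.false_eq_true]
          rw [hstep, pv_fold_eq_rawS args false out]
          simp only [pvRawS, h1, h2, h3, if_true, if_false, Bool.false_eq_true]
    · rw [Bool.not_eq_true] at h1
      by_cases h2 : acc = true
      · subst h2
        have hstep : pvStepA (true, out) a
            = (true, out
                ++ (if !(PySem.Str.isIn ":" (PySem.Str.strip a))
                    then [PySem.Str.strip a ++ ":*"] else [])
                ++ [PySem.Str.strip a]) := by
          simp only [pvStepA, h1, Bool.false_eq_true, if_false, if_true]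
        rw [hstep, pv_fold_eq_rawS args true]
        simp only [pvRawS, h1, Bool.false_eq_true, if_false, if_true, pv_expand_flat]
        simp only [List.append_assoc]
      · rw [Bool.not_eq_true] at h2
        subst h2
        have hstep : pvStepA (false, out) a = (false, out) := by
          simp only [pvStepA, h1, Bool.false_eq_true, if_false]
        rw [hstep, pv_fold_eq_rawS args false out]
        simp only [pvRawS, h1, Bool.false_eq_true, if_false]

-- the accumulate=true state consumes exactly the run of non-switch arguments
lemma pv_rawS_true (l : List String) :
    pvRawS true l = l.takeWhile pvRun ++ pvRawS false (l.dropWhile pvRun) := by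
  induction l with
  | nil => simp [pvRawS]
  | cons s rest ih =>
    by_cases h : PySem.Str.startswith s "-" = true
    · have hp : pvRun s = false := by unfold pvRun; rw [h]; rfl
      rw [List.takeWhile_cons, List.dropWhile_cons]
      simp only [hp, Bool.false_eq_true, if_false, List.nil_append]
      show pvRawS true (s :: rest) = pvRawS false (s :: rest)
      simp only [pvRawS, h, if_true]
    · have hp : pvRun s = true := by
        rw [Bool.not_eq_true] at h; unfold pvRun; rw [h]; rfl
      rw [List.takeWhile_cons, List.dropWhile_cons]
      simp only [hp, if_true, List.cons_append]
      simp only [pvRawS, h, Bool.false_eq_true, if_false, if_true]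
      rw [ih]

lemma pv_startswith_trans (s : String)
    (h : PySem.Str.startswith s "--disable=" = true) : PySem.Str.startswith s "-" = true := by
  rw [PySem.Str.startswith_eq] at h ⊢
  rw [PySem.Chars.startswith_iff] at h ⊢
  exact List.IsPrefix.trans (by decide) h

lemma pv_rawS_false_eq_collect : ∀ (n : Nat) (l : List String), l.length ≤ n →
    pvRawS false l = pvCollect l
  | 0, [], _ => by simp [pvRawS, pvCollect]
  | Nat.succ n, [], _ => by simp [pvRawS, pvCollect]
  | Nat.succ n, s :: rest, hlen => by
    have hr : rest.length ≤ n := by simpa using hlen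
    by_cases h2 : (s == "--disable") = true
    · have hs : s = "--disable" := eq_of_beq h2
      have h1 : PySem.Str.startswith s "-" = true := by subst hs; decide
      rw [pvCollect]
      simp only [pvRawS, h1, h2, if_true]
      rw [pv_rawS_true, pv_rawS_false_eq_collect n (rest.dropWhile pvRun)
        (le_trans (List.length_dropWhile_le pvRun rest) hr)]
    · by_cases h1 : PySem.Str.startswith s "-" = true
      · by_cases h3 : PySem.Str.startswith s "--disable=" = true
        · rw [pvCollect]
          simp only [pvRawS, h1, h2, h3, if_true, if_false, Bool.false_eq_true]
          rw [pv_rawS_false_eq_collect n rest hr]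
        · rw [pvCollect]
          simp only [pvRawS, h1, h2, h3, if_true, if_false, Bool.false_eq_true]
          exact pv_rawS_false_eq_collect n rest hr
      · have h3 : PySem.Str.startswith s "--disable=" = false := by
          cases hx : PySem.Str.startswith s "--disable=" with
          | false => rfl
          | true => exact absurd (pv_startswith_trans s hx) h1
        rw [pvCollect]
        simp only [pvRawS, h1, h2, h3, if_false, Bool.false_eq_true]
        exact pv_rawS_false_eq_collect n rest hr

-- ===== VERDICT (by name: the statement is the Claim_ definition above) =====
theorem parse_disabled_plugins_py_spec : Claim_equal_parse_disabled_plugins_py := by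
  intro arguments _
  unfold Spec_parse_disabled_plugins_py parse_disabled_plugins_py parse_disabled_plugins_py_alt
  rw [pv_fold_eq_rawS arguments false [], List.nil_append,
    pv_rawS_false_eq_collect (arguments.map PySem.Str.strip).length _ le_rfl]
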